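-- pv_equiv track=rewrite | github.com/ChakradharG/CompetitiveCoding | LeetCode/Chakradhar/3887.py | numberOfEdgesAdded
-- ===== SOURCE A (Python) =====
-- from typing import List
--
-- def numberOfEdgesAdded(n: int, edges: List[List[int]]) -> int:
--     def union(a, b, w):
--         (a, pa), (b, pb) = find(a), find(b)
--         x = pa ^ pb ^ w
--         if a != b:
--             parent[b] = a
--             parity[b] = x
--             return 1
--         else:
--             if x:
--                 return 0
--             else:
--                 return 1
--
--     def find(a):
--         if parent[a] == a:
--             return [a, 0]
--         A, p = find(parent[a])
--         parent[a] = A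
--         parity[a] ^= p
--         return [parent[a], parity[a]]
--
--     parent = [i for i in range(n)]
--     parity = [0 for i in range(n)]
--
--     ans = 0
--     for u, v, w in edges:
--         ans += union(u, v, w)
--
--     return ans
-- ===== SOURCE B (Python) =====
-- from typing import List
--
-- def numberOfEdgesAdded(n: int, edges: List[List[int]]) -> int:
--     parent = list(range(n))
--     parity = [0] * n
--
--     def find(a):
--         # phase 1: walk up to the root, collecting the path
--         path = []
--         while parent[a] != a:
--             path.append(a)
--             a = parent[a]
--         root = a
--         # phase 2: rewrite the path back-to-front with suffix parities
--         acc = 0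
--         for node in reversed(path):
--             acc = parity[node] ^ acc
--             parent[node] = root
--             parity[node] = acc
--         return root, acc
--
--     ans = 0
--     for u, v, w in edges:
--         ra, pa = find(u)
--         rb, pb = find(v)
--         x = pa ^ pb ^ w
--         if ra != rb:
--             parent[rb] = ra
--             parity[rb] = x
--             ans += 1
--         elif x == 0:
--             ans += 1
--     return ans
-- ===== Notes on version B (the rewrite author's own statement) =====
-- stated objective: alternative
-- what changed: A's recursive path-compressing find is replaced by an iterative two-pass find: one loop walks parent pointers to the root collecting the path, a second loop rewrites the collected path back-to-front, assigning each node the suffix XOR of parities as its new parity; the union bookkeeping is inlined into the edge loop.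
import Mathlib
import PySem

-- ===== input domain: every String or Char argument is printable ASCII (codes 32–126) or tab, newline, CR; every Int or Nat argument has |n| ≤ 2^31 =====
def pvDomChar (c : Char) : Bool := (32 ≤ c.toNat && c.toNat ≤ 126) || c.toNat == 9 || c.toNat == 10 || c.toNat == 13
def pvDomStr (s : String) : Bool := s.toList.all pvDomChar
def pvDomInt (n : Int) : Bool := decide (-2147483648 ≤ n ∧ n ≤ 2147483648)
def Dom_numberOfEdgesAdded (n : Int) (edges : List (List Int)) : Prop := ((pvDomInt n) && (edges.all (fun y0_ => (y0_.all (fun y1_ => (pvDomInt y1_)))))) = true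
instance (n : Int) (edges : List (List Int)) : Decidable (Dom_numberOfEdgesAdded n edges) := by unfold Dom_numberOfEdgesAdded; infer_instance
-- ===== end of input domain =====

-- B replaces A's recursive path-compressing find by an iterative two-pass find (walk to the
-- root collecting the path, then rewrite the path back-to-front with suffix parities);
-- objective: alternative decomposition (no recursion). Both mutate only local lists.

-- ===== PORT A =====
-- pvGet/pvSet: Python's xs[i] read / xs[i]=v write, exact on in-range indices incl. negative wraparound
def pvGet (xs : List Int) (i : Int) : Int := PySem.List.pyGetD xs i 0
def pvSet (xs : List Int) (i : Int) (v : Int) : List Int := PySem.List.pySetD xs i v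

-- A's recursive `find` (fuel is a termination guard only; never exhausted under Pre_)
def findA : Nat → (List Int × List Int) → Int → (List Int × List Int) × Int × Int
  | 0, st, a => (st, (a, 0))
  | fuel+1, st, a =>
    if pvGet st.1 a = a then (st, (a, 0))
    else
      let r := findA fuel st (pvGet st.1 a)
      let p2 := pvSet r.1.1 a r.2.1
      let q2 := pvSet r.1.2 a (PySem.Int.bxor (pvGet r.1.2 a) r.2.2)
      ((p2, q2), (pvGet p2 a, pvGet q2 a))

def unionA (fuel : Nat) (st : List Int × List Int) (u v w : Int) : (List Int × List Int) × Int :=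
  let r1 := findA fuel st u
  let r2 := findA fuel r1.1 v
  let x := PySem.Int.bxor (PySem.Int.bxor r1.2.2 r2.2.2) w
  if r1.2.1 ≠ r2.2.1 then ((pvSet r2.1.1 r2.2.1 r1.2.1, pvSet r2.1.2 r2.2.1 x), 1)
  else if x ≠ 0 then (r2.1, 0)
  else (r2.1, 1)

def numberOfEdgesAdded (n : Int) (edges : List (List Int)) : Int :=
  let parent := PySem.List.pyRange 0 n 1
  let parity := (PySem.List.pyRange 0 n 1).map (fun _ => (0 : Int))
  (edges.foldl
    (fun (s : (List Int × List Int) × Int) e =>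
      match e with
      | [u, v, w] =>
        let r := unionA (s.1.1.length + 1) s.1 u v w
        (r.1, s.2 + r.2)
      | _ => s)
    ((parent, parity), 0)).2

-- ===== PORT B =====
-- B's own copies of the indexing primitives (Python's xs[i] read / xs[i]=v write)
def pvGetB (xs : List Int) (i : Int) : Int := PySem.List.pyGetD xs i 0
def pvSetB (xs : List Int) (i : Int) (v : Int) : List Int := PySem.List.pySetD xs i v

-- B's find, phase 1: walk parent pointers up to the root, collecting the path
def walkB : Nat → List Int → List Int → Int → List Int × Int
  | 0, _, path, a => (path, a)
  | fuel+1, p, path, a =>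
    if pvGetB p a = a then (path, a)
    else walkB fuel p (path ++ [a]) (pvGetB p a)

-- B's find, phase 2: rewrite the collected path back-to-front with suffix parities
def compressB (root : Int) : List Int → (List Int × List Int) → Int → (List Int × List Int) × Int
  | [], st, acc => (st, acc)
  | node :: rest, st, acc =>
    let acc' := PySem.Int.bxor (pvGetB st.2 node) acc
    compressB root rest (pvSetB st.1 node root, pvSetB st.2 node acc') acc'

def findB (fuel : Nat) (st : List Int × List Int) (a : Int) : (List Int × List Int) × Int × Int :=
  let w := walkB fuel st.1 [] a
  let c := compressB w.2 w.1.reverse st 0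
  (c.1, (w.2, c.2))

def numberOfEdgesAdded_alt (n : Int) (edges : List (List Int)) : Int :=
  let parent := PySem.List.pyRange 0 n 1
  let parity := List.replicate parent.length (0 : Int)
  (edges.foldl
    (fun (s : (List Int × List Int) × Int) e =>
      match e with
      | u :: rest1 =>
        match rest1 with
        | v :: rest2 =>
          match rest2 with
          | w :: _ =>
            let r1 := findB (s.1.1.length + 1) s.1 u
            let r2 := findB (s.1.1.length + 1) r1.1 v
            let x := PySem.Int.bxor (PySem.Int.bxor r1.2.2 r2.2.2) w
            if r1.2.1 ≠ r2.2.1 then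
              ((pvSetB r2.1.1 r2.2.1 r1.2.1, pvSetB r2.1.2 r2.2.1 x), s.2 + 1)
            else if x = 0 then (r2.1, s.2 + 1)
            else (r2.1, s.2)
          | [] => s
        | [] => s
      | [] => s)
    ((parent, parity), 0)).2

-- ===== PRECONDITION & SPEC =====
-- Pre_ excludes exactly the inputs on which A raises: an edge that is not a 3-element list
-- (ValueError on unpacking) or a node index outside [-n, n) (IndexError).
def Pre_numberOfEdgesAdded (n : Int) (edges : List (List Int)) : Prop :=
  ∀ e ∈ edges, e.length = 3 ∧ (-n ≤ e.getD 0 0 ∧ e.getD 0 0 < n) ∧ (-n ≤ e.getD 1 0 ∧ e.getD 1 0 < n)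
instance (n : Int) (edges : List (List Int)) : Decidable (Pre_numberOfEdgesAdded n edges) := by
  unfold Pre_numberOfEdgesAdded; infer_instance

def pvWitness_numberOfEdgesAdded : Int × List (List Int) := (3, [[0, 1, 1], [1, 2, 0], [-3, 2, 1]])

def Spec_numberOfEdgesAdded (n : Int) (edges : List (List Int)) (out : Int) : Prop := out = numberOfEdgesAdded_alt n edges
instance (n : Int) (edges : List (List Int)) (out : Int) : Decidable (Spec_numberOfEdgesAdded n edges out) := by unfold Spec_numberOfEdgesAdded; infer_instance

-- ===== CLAIM (what is proved, stated in full; the proofs are below) =====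
def Claim_equal_numberOfEdgesAdded : Prop := ∀ (n : Int) (edges : List (List Int)), Dom_numberOfEdgesAdded n edges → Pre_numberOfEdgesAdded n edges → Spec_numberOfEdgesAdded n edges (numberOfEdgesAdded n edges)

-- ===== LEMMAS AND PROOFS =====

-- in-range (Python) index, and the cell (Nat position) it denotes
def InR (len : Nat) (i : Int) : Prop := -(len : Int) ≤ i ∧ i < (len : Int)

def cellOf (len : Nat) (i : Int) : Nat := if 0 ≤ i then i.toNat else len - (-i).toNat

lemma cellOf_lt {len : Nat} {i : Int} (h : InR len i) : cellOf len i < len := by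
  rcases h with ⟨h1, h2⟩; unfold cellOf; split <;> omega

lemma cellOf_natCast (len : Nat) (c : Nat) : cellOf len (c : Int) = c := by
  unfold cellOf; simp

lemma pvGet_eq_getD (xs : List Int) (i : Int) (h : InR xs.length i) :
    pvGet xs i = xs.getD (cellOf xs.length i) 0 := by
  rcases h with ⟨h1, h2⟩
  by_cases h0 : 0 ≤ i
  · simp [pvGet, PySem.List.pyGetD, PySem.List.pyGet?, PySem.List.pyIdx?, cellOf, h0, h2,
      List.getD]
  · simp [pvGet, PySem.List.pyGetD, PySem.List.pyGet?, PySem.List.pyIdx?, cellOf, h0, h1,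
      List.getD]

lemma pvSet_eq_set (xs : List Int) (i : Int) (v : Int) (h : InR xs.length i) :
    pvSet xs i v = xs.set (cellOf xs.length i) v := by
  rcases h with ⟨h1, h2⟩
  by_cases h0 : 0 ≤ i
  · simp [pvSet, PySem.List.pySetD, PySem.List.pySet?, PySem.List.pyIdx?, cellOf, h0, h2]
  · simp [pvSet, PySem.List.pySetD, PySem.List.pySet?, PySem.List.pyIdx?, cellOf, h0, h1]

lemma length_pvSet (xs : List Int) (i : Int) (v : Int) : (pvSet xs i v).length = xs.length := by
  simp only [pvSet, PySem.List.pySetD, PySem.List.pySet?]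
  cases h : PySem.List.pyIdx? xs.length i <;> simp

lemma cell_congr (xs : List Int) {i j : Int} (hi : InR xs.length i) (hj : InR xs.length j)
    (h : cellOf xs.length i = cellOf xs.length j) : pvGet xs i = pvGet xs j := by
  rw [pvGet_eq_getD xs i hi, pvGet_eq_getD xs j hj, h]

lemma pvGet_pvSet (xs : List Int) (i j v : Int) (hi : InR xs.length i) (hj : InR xs.length j) :
    pvGet (pvSet xs i v) j =
      if cellOf xs.length i = cellOf xs.length j then v else pvGet xs j := by
  rw [pvSet_eq_set xs i v hi]
  have hj' : InR (xs.set (cellOf xs.length i) v).length j := by simpa using hj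
  rw [pvGet_eq_getD _ j hj']
  simp only [List.length_set]
  split
  · rename_i hcell
    rw [← hcell]
    have hlt : cellOf xs.length i < xs.length := cellOf_lt hi
    simp [List.getD, hlt]
  · rename_i hcell
    rw [pvGet_eq_getD xs j hj]
    simp [List.getD, hcell]

lemma pvGetB_eq : pvGetB = pvGet := rfl
lemma pvSetB_eq : pvSetB = pvSet := rfl

-- the chain of parent pointers from a node to its root
inductive Chain (p : List Int) : Int → List Int → Int → Prop
  | stop (a : Int) : pvGet p a = a → Chain p a [] a
  | step (a : Int) (l : List Int) (r : Int) :
      pvGet p a ≠ a → Chain p (pvGet p a) l r → Chain p a (a :: l) r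

lemma chain_det {p : List Int} {a : Int} {l l' : List Int} {r r' : Int}
    (h : Chain p a l r) (h' : Chain p a l' r') : l = l' ∧ r = r' := by
  induction h generalizing l' r' with
  | stop a ha => cases h' with
    | stop => exact ⟨rfl, rfl⟩
    | step _ _ _ hne => exact absurd ha hne
  | step a l r hne hc ih => cases h' with
    | stop _ ha => exact absurd ha hne
    | step _ l2 r2 _ hc2 =>
      obtain ⟨h1, h2⟩ := ih hc2
      exact ⟨by rw [h1], h2⟩

lemma chain_root {p : List Int} {a : Int} {l : List Int} {r : Int} (h : Chain p a l r) :
    pvGet p r = r := by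
  induction h with
  | stop a ha => exact ha
  | step _ _ _ _ _ ih => exact ih

lemma chain_mem {p : List Int} {a : Int} {l : List Int} {r : Int} (h : Chain p a l r) :
    ∀ x ∈ l, ∃ m, Chain p x (x :: m) r ∧ m.length < l.length := by
  induction h with
  | stop => intro x hx; simp at hx
  | step a l r hne hc ih =>
    intro x hx
    rcases List.mem_cons.mp hx with rfl | hx'
    · exact ⟨l, Chain.step _ l r hne hc, by simp⟩
    · obtain ⟨m, hm, hlt⟩ := ih x hx'
      exact ⟨m, hm, by simpa using Nat.lt_succ_of_lt hlt⟩

-- entries of the parent array are nodes in [0, len)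
def entriesOk (p : List Int) : Prop :=
  ∀ c : Nat, c < p.length → 0 ≤ pvGet p (c : Int) ∧ pvGet p (c : Int) < (p.length : Int)

lemma pvGet_range {p : List Int} (hE : entriesOk p) {i : Int} (hi : InR p.length i) :
    0 ≤ pvGet p i ∧ pvGet p i < (p.length : Int) := by
  have hc : cellOf p.length i < p.length := cellOf_lt hi
  have hi' : InR p.length ((cellOf p.length i : Nat) : Int) := by
    constructor <;> omega
  have heq := cell_congr p hi hi' (by rw [cellOf_natCast])
  rw [heq]
  exact hE _ hc

lemma InR_pvGet {p : List Int} (hE : entriesOk p) {i : Int} (hi : InR p.length i) :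
    InR p.length (pvGet p i) := by
  obtain ⟨h1, h2⟩ := pvGet_range hE hi
  exact ⟨by omega, h2⟩

lemma chain_all_nonneg {p : List Int} (hE : entriesOk p) {a : Int} {l : List Int} {r : Int}
    (h : Chain p a l r) (h0 : 0 ≤ a ∧ a < (p.length : Int)) :
    ∀ x ∈ l, 0 ≤ x ∧ x < (p.length : Int) := by
  induction h with
  | stop => intro x hx; simp at hx
  | step a l r hne hc ih =>
    intro x hx
    rcases List.mem_cons.mp hx with rfl | hx'
    · exact h0
    · exact ih (pvGet_range hE ⟨by omega, h0.2⟩) x hx'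

lemma chain_tail_nonneg {p : List Int} (hE : entriesOk p) {a : Int} {l : List Int} {r : Int}
    (ha : InR p.length a) (h : Chain p (pvGet p a) l r) :
    ∀ x ∈ l, 0 ≤ x ∧ x < (p.length : Int) :=
  chain_all_nonneg hE h (pvGet_range hE ha)

lemma chain_mem_InR {p : List Int} (hE : entriesOk p) {a : Int} {l : List Int} {r : Int}
    (ha : InR p.length a) (h : Chain p a l r) : ∀ x ∈ l, InR p.length x := by
  cases h with
  | stop => intro x hx; simp at hx
  | step a l r hne hc =>
    intro x hx
    rcases List.mem_cons.mp hx with rfl | hx'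
    · exact ha
    · obtain ⟨h1, h2⟩ := chain_tail_nonneg hE ha hc x hx'
      exact ⟨by omega, h2⟩

lemma chain_root_range {p : List Int} (hE : entriesOk p) {a : Int} {l : List Int} {r : Int}
    (ha : InR p.length a) (h : Chain p a l r) : 0 ≤ r ∧ r < (p.length : Int) := by
  induction h with
  | stop a hstop =>
    have hr := pvGet_range hE ha
    rw [hstop] at hr
    exact hr
  | step a l r hne hc ih => exact ih (InR_pvGet hE ha)

lemma chain_nodup {p : List Int} (hE : entriesOk p) {a : Int} {l : List Int} {r : Int}
    (ha : InR p.length a) (h : Chain p a l r) : (l.map (cellOf p.length)).Nodup := by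
  induction h with
  | stop => simp
  | step a l r hne hc ih =>
    have ha' : InR p.length (pvGet p a) := InR_pvGet hE ha
    simp only [List.map_cons, List.nodup_cons]
    refine ⟨?_, ih ha'⟩
    intro hmem
    obtain ⟨b, hb, hcell⟩ := List.mem_map.mp hmem
    have hbR : 0 ≤ b ∧ b < (p.length : Int) := chain_tail_nonneg hE ha hc b hb
    have hbInR : InR p.length b := ⟨by omega, hbR.2⟩
    have hgetb : pvGet p b = pvGet p a := cell_congr p hbInR ha hcell
    obtain ⟨m, hm, hlt⟩ := chain_mem hc b hb
    cases hm with
    | step _ _ _ hne2 hc2 =>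
      rw [hgetb] at hc2
      obtain ⟨heq, -⟩ := chain_det hc2 hc
      rw [heq] at hlt
      omega

lemma nodup_lt_length {L : Nat} {ns : List Nat} (hnd : ns.Nodup) (hlt : ∀ y ∈ ns, y < L) :
    ns.length ≤ L := by
  have hsub : ns.toFinset ⊆ Finset.range L := by
    intro y hy
    exact Finset.mem_range.mpr (hlt y (List.mem_toFinset.mp hy))
  have hcard := Finset.card_le_card hsub
  rwa [List.toFinset_card_of_nodup hnd, Finset.card_range] at hcard

lemma chain_len_le {p : List Int} (hE : entriesOk p) {a : Int} {l : List Int} {r : Int}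
    (ha : InR p.length a) (h : Chain p a l r) : l.length ≤ p.length := by
  have hnd := chain_nodup hE ha h
  have hlt : ∀ y ∈ l.map (cellOf p.length), y < p.length := by
    intro y hy
    obtain ⟨x, hx, rfl⟩ := List.mem_map.mp hy
    exact cellOf_lt (chain_mem_InR hE ha h x hx)
  have hle := nodup_lt_length hnd hlt
  simpa using hle

def totalP (p : List Int) : Prop := ∀ c : Nat, c < p.length → ∃ l r, Chain p (c : Int) l r

lemma chain_exists {p : List Int} (hE : entriesOk p) (hT : totalP p) {a : Int}
    (ha : InR p.length a) : ∃ l r, Chain p a l r := by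
  by_cases hstop : pvGet p a = a
  · exact ⟨[], a, Chain.stop a hstop⟩
  · have hrange := pvGet_range hE ha
    have hc : (pvGet p a).toNat < p.length := by omega
    obtain ⟨l, r, hch⟩ := hT (pvGet p a).toNat hc
    have hcast : ((pvGet p a).toNat : Int) = pvGet p a := by omega
    rw [hcast] at hch
    exact ⟨a :: l, r, Chain.step a l r hstop hch⟩

def StInv (st : List Int × List Int) : Prop :=
  st.2.length = st.1.length ∧ entriesOk st.1 ∧ totalP st.1

-- walkB computes exactly the chain
lemma walk_spec {p : List Int} {a : Int} {l : List Int} {r : Int} (h : Chain p a l r) :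
    ∀ fuel acc, l.length < fuel → walkB fuel p acc a = (acc ++ l, r) := by
  induction h with
  | stop a ha =>
    intro fuel acc hf
    cases fuel with
    | zero => omega
    | succ f => simp [walkB, pvGetB_eq, ha]
  | step a l r hne hc ih =>
    intro fuel acc hf
    cases fuel with
    | zero => simp at hf
    | succ f =>
      simp only [walkB, pvGetB_eq, if_neg hne]
      rw [ih f (acc ++ [a]) (by simpa using hf)]
      simp

lemma compressB_len (root : Int) : ∀ (ns : List Int) (st : List Int × List Int) (acc : Int),
    (compressB root ns st acc).1.1.length = st.1.length ∧
    (compressB root ns st acc).1.2.length = st.2.length := by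
  intro ns
  induction ns with
  | nil => intro st acc; simp [compressB]
  | cons node rest ih =>
    intro st acc
    simp only [compressB, pvGetB_eq, pvSetB_eq]
    obtain ⟨h1, h2⟩ := ih (pvSet st.1 node root, pvSet st.2 node
      (PySem.Int.bxor (pvGet st.2 node) acc)) (PySem.Int.bxor (pvGet st.2 node) acc)
    constructor
    · rw [h1]; exact length_pvSet _ _ _
    · rw [h2]; exact length_pvSet _ _ _

lemma compressB_append (root : Int) : ∀ (ns : List Int) (st : List Int × List Int) (acc b : Int),
    compressB root (ns ++ [b]) st acc =
      ((pvSet (compressB root ns st acc).1.1 b root,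
        pvSet (compressB root ns st acc).1.2 b
          (PySem.Int.bxor (pvGet (compressB root ns st acc).1.2 b) (compressB root ns st acc).2)),
       PySem.Int.bxor (pvGet (compressB root ns st acc).1.2 b) (compressB root ns st acc).2) := by
  intro ns
  induction ns with
  | nil => intro st acc b; simp [compressB, pvGetB_eq, pvSetB_eq]
  | cons node rest ih =>
    intro st acc b
    simp only [List.cons_append, compressB, pvGetB_eq, pvSetB_eq]
    exact ih _ _ b

-- after compression each parent cell keeps its value or holds root
lemma compressB_p_desc (root : Int) : ∀ (ns : List Int) (st : List Int × List Int) (acc x : Int),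
    InR st.1.length x → (∀ y ∈ ns, InR st.1.length y) →
    pvGet (compressB root ns st acc).1.1 x = pvGet st.1 x ∨
      (pvGet (compressB root ns st acc).1.1 x = root ∧
        ∃ y ∈ ns, cellOf st.1.length y = cellOf st.1.length x) := by
  intro ns
  induction ns with
  | nil => intro st acc x hx hys; simp [compressB]
  | cons node rest ih =>
    intro st acc x hx hys
    simp only [compressB, pvGetB_eq, pvSetB_eq]
    have hnode : InR st.1.length node := hys node List.mem_cons_self
    have hlen : (pvSet st.1 node root).length = st.1.length := length_pvSet _ _ _
    have hx' : InR (pvSet st.1 node root).length x := by rwa [hlen]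
    have hys' : ∀ y ∈ rest, InR (pvSet st.1 node root).length y := by
      intro y hy; rw [hlen]; exact hys y (List.mem_cons_of_mem _ hy)
    rcases ih (pvSet st.1 node root, pvSet st.2 node (PySem.Int.bxor (pvGet st.2 node) acc))
        (PySem.Int.bxor (pvGet st.2 node) acc) x hx' hys' with h | ⟨h, y, hy, hcy⟩
    · rw [h, pvGet_pvSet st.1 node x root hnode hx]
      split
      · rename_i hcell
        exact Or.inr ⟨rfl, node, List.mem_cons_self, hcell⟩
      · exact Or.inl rfl
    · right
      refine ⟨h, y, List.mem_cons_of_mem _ hy, ?_⟩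
      rwa [hlen] at hcy

-- totality survives any rewrite that only redirects cells to a root of the new array
lemma total_update {p p' : List Int} (hE : entriesOk p)
    {rv : Int} (hrv : pvGet p' rv = rv)
    (hdesc : ∀ x, InR p.length x → pvGet p' x = pvGet p x ∨ pvGet p' x = rv) :
    ∀ {a : Int} {l : List Int} {r : Int}, Chain p a l r → InR p.length a →
      ∃ l' r', Chain p' a l' r' := by
  intro a l r h
  induction h with
  | stop a hstop =>
    intro ha
    rcases hdesc a ha with h' | h'
    · exact ⟨[], a, Chain.stop a (by rw [h', hstop])⟩
    · by_cases hra : rv = a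
      · exact ⟨[], a, Chain.stop a (by rw [h', hra])⟩
      · refine ⟨[a], rv, Chain.step a [] rv (by rw [h']; exact fun hh => hra hh) ?_⟩
        rw [h']
        exact Chain.stop rv hrv
  | step a l r hne hc ih =>
    intro ha
    rcases hdesc a ha with h' | h'
    · obtain ⟨l'', r'', hch⟩ := ih (InR_pvGet hE ha)
      refine ⟨a :: l'', r'', Chain.step a l'' r'' ?_ ?_⟩
      · rw [h']; exact hne
      · rw [h']; exact hch
    · by_cases hra : rv = a
      · exact ⟨[], a, Chain.stop a (by rw [h', hra])⟩
      · refine ⟨[a], rv, Chain.step a [] rv (by rw [h']; exact fun hh => hra hh) ?_⟩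
        rw [h']
        exact Chain.stop rv hrv

-- the core lemma: A's recursive find equals B's compress-the-path description
lemma find_eq_spec {p q : List Int} (hE : entriesOk p) (hlenq : q.length = p.length) :
    ∀ {a : Int} {l : List Int} {r : Int}, Chain p a l r → InR p.length a →
    ∀ fuel, l.length < fuel →
      findA fuel (p, q) a =
        ((compressB r l.reverse (p, q) 0).1, (r, (compressB r l.reverse (p, q) 0).2)) := by
  intro a l r h
  induction h with
  | stop a hstop =>
    intro ha fuel hf
    cases fuel with
    | zero => omega
    | succ f => simp [findA, hstop, compressB]
  | step a l r hne hc ih =>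
    intro ha fuel hf
    cases fuel with
    | zero => simp at hf
    | succ f =>
      have ha' : InR p.length (pvGet p a) := InR_pvGet hE ha
      have hrec := ih ha' f (by simpa using hf)
      simp only [findA, if_neg hne]
      rw [hrec]
      have hrev : (a :: l).reverse = l.reverse ++ [a] := by simp
      rw [hrev, compressB_append]
      have hClen : (compressB r l.reverse (p, q) 0).1.1.length = p.length :=
        (compressB_len r l.reverse (p, q) 0).1
      have hqClen : (compressB r l.reverse (p, q) 0).1.2.length = q.length :=
        (compressB_len r l.reverse (p, q) 0).2
      have haC : InR (compressB r l.reverse (p, q) 0).1.1.length a := by rwa [hClen]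
      have haQ : InR (compressB r l.reverse (p, q) 0).1.2.length a := by
        rw [hqClen, hlenq]; exact ha
      have hget1 : pvGet (pvSet (compressB r l.reverse (p, q) 0).1.1 a r) a = r := by
        rw [pvGet_pvSet _ a a r haC haC]; simp
      have hget2 : pvGet (pvSet (compressB r l.reverse (p, q) 0).1.2 a
          (PySem.Int.bxor (pvGet (compressB r l.reverse (p, q) 0).1.2 a)
            (compressB r l.reverse (p, q) 0).2)) a =
          PySem.Int.bxor (pvGet (compressB r l.reverse (p, q) 0).1.2 a)
            (compressB r l.reverse (p, q) 0).2 := by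
        rw [pvGet_pvSet _ a a _ haQ haQ]; simp
      simp only [hget1, hget2]

-- bundle: on an invariant state, A's find equals B's find, and the invariant survives
lemma find_all {p q : List Int} {a : Int} (hI : StInv (p, q)) (ha : InR p.length a)
    {fuel : Nat} (hf : p.length + 1 ≤ fuel) :
    findA fuel (p, q) a = findB fuel (p, q) a
    ∧ StInv (findB fuel (p, q) a).1
    ∧ (findB fuel (p, q) a).1.1.length = p.length
    ∧ (findB fuel (p, q) a).1.2.length = q.length
    ∧ (∀ s, InR p.length s → pvGet p s = s → pvGet (findB fuel (p, q) a).1.1 s = s)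
    ∧ (0 ≤ (findB fuel (p, q) a).2.1 ∧ (findB fuel (p, q) a).2.1 < (p.length : Int))
    ∧ pvGet (findB fuel (p, q) a).1.1 (findB fuel (p, q) a).2.1 = (findB fuel (p, q) a).2.1 := by
  obtain ⟨hlq, hE, hT⟩ := hI
  obtain ⟨l, r, hc⟩ := chain_exists hE hT ha
  have hlen := chain_len_le hE ha hc
  have hflen : l.length < fuel := by
    have hlen' : l.length ≤ p.length := hlen
    omega
  have hfB : findB fuel (p, q) a =
      ((compressB r l.reverse (p, q) 0).1, (r, (compressB r l.reverse (p, q) 0).2)) := by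
    simp only [findB]
    rw [walk_spec hc fuel [] hflen]
    simp
  have hfA := find_eq_spec hE hlq hc ha fuel hflen
  have hClen1 : (compressB r l.reverse (p, q) 0).1.1.length = p.length :=
    (compressB_len r l.reverse (p, q) 0).1
  have hClen2 : (compressB r l.reverse (p, q) 0).1.2.length = q.length :=
    (compressB_len r l.reverse (p, q) 0).2
  have hys : ∀ y ∈ l.reverse, InR p.length y := fun y hy =>
    chain_mem_InR hE ha hc y (List.mem_reverse.mp hy)
  have hdesc : ∀ x, InR p.length x →
      pvGet (compressB r l.reverse (p, q) 0).1.1 x = pvGet p x ∨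
        (pvGet (compressB r l.reverse (p, q) 0).1.1 x = r ∧
          ∃ y ∈ l.reverse, cellOf p.length y = cellOf p.length x) := fun x hx =>
    compressB_p_desc r l.reverse (p, q) 0 x hx hys
  have hrR : 0 ≤ r ∧ r < (p.length : Int) := chain_root_range hE ha hc
  have hrInR : InR p.length r := ⟨by omega, hrR.2⟩
  have hroot' : pvGet (compressB r l.reverse (p, q) 0).1.1 r = r := by
    rcases hdesc r hrInR with h | ⟨h, -⟩
    · rw [h]; exact chain_root hc
    · exact h
  have hrootpres : ∀ s, InR p.length s → pvGet p s = s →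
      pvGet (compressB r l.reverse (p, q) 0).1.1 s = s := by
    intro s hs hroots
    rcases hdesc s hs with h | ⟨h, y, hy, hcy⟩
    · rw [h, hroots]
    · have hyInR := hys y hy
      have hgy : pvGet p y = pvGet p s := cell_congr p hyInR hs hcy
      obtain ⟨m, hm, -⟩ := chain_mem hc y (List.mem_reverse.mp hy)
      cases hm with
      | step _ _ _ hne2 hc2 =>
        rw [hgy, hroots] at hc2
        have hstop : Chain p s [] s := Chain.stop s hroots
        obtain ⟨-, hr⟩ := chain_det hc2 hstop
        rw [h, hr]
  have hEC : entriesOk (compressB r l.reverse (p, q) 0).1.1 := by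
    intro c hcL
    rw [hClen1] at hcL
    have hcInR : InR p.length (c : Int) := by
      constructor <;> omega
    rw [hClen1]
    rcases hdesc _ hcInR with h | ⟨h, -⟩
    · rw [h]; exact hE c hcL
    · rw [h]; exact hrR
  have hTC : totalP (compressB r l.reverse (p, q) 0).1.1 := by
    intro c hcL
    rw [hClen1] at hcL
    obtain ⟨l0, r0, hc0⟩ := hT c hcL
    have hcInR : InR p.length (c : Int) := by
      constructor <;> omega
    exact total_update hE hroot' (fun x hx => (hdesc x hx).imp id And.left) hc0 hcInR
  refine ⟨by rw [hfA, hfB], ?_, ?_, ?_, ?_, ?_, ?_⟩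
  · rw [hfB]
    exact ⟨by rw [hClen2, hClen1, hlq], hEC, hTC⟩
  · rw [hfB]; exact hClen1
  · rw [hfB]; exact hClen2
  · rw [hfB]; exact hrootpres
  · rw [hfB]; exact hrR
  · rw [hfB]; exact hroot'

-- one union step, both versions, plus invariant bookkeeping; then the whole fold
lemma fold_eq (L : Nat) :
    ∀ (es : List (List Int)) (st : List Int × List Int) (ans : Int),
      StInv st → st.1.length = L →
      (∀ e ∈ es, ∃ u v w : Int, e = [u, v, w] ∧ InR L u ∧ InR L v) →
      List.foldl
        (fun (s : (List Int × List Int) × Int) e =>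
          match e with
          | [u, v, w] =>
            let r := unionA (s.1.1.length + 1) s.1 u v w
            (r.1, s.2 + r.2)
          | _ => s) (st, ans) es
      = List.foldl
        (fun (s : (List Int × List Int) × Int) e =>
          match e with
          | u :: rest1 =>
            match rest1 with
            | v :: rest2 =>
              match rest2 with
              | w :: _ =>
                let r1 := findB (s.1.1.length + 1) s.1 u
                let r2 := findB (s.1.1.length + 1) r1.1 v
                let x := PySem.Int.bxor (PySem.Int.bxor r1.2.2 r2.2.2) w
                if r1.2.1 ≠ r2.2.1 then
                  ((pvSetB r2.1.1 r2.2.1 r1.2.1, pvSetB r2.1.2 r2.2.1 x), s.2 + 1)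
                else if x = 0 then (r2.1, s.2 + 1)
                else (r2.1, s.2)
              | [] => s
            | [] => s
          | [] => s) (st, ans) es := by
  intro es
  induction es with
  | nil => intro st ans _ _ _; rfl
  | cons e rest ih =>
    intro st ans hI hL hPre
    obtain ⟨u, v, w, rfl, hu, hv⟩ := hPre e List.mem_cons_self
    obtain ⟨p, q⟩ := st
    have hpL : p.length = L := hL
    have hu' : InR p.length u := by rw [hpL]; exact hu
    obtain ⟨heq1, hI1, hlen11, hlen12, hpres1, hrange1, hroot1⟩ :=
      find_all (p := p) (q := q) hI hu' (le_refl (p.length + 1))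
    have hv' : InR (findB (p.length + 1) (p, q) u).1.1.length v := by
      rw [hlen11, hpL]; exact hv
    have hf2 : (findB (p.length + 1) (p, q) u).1.1.length + 1 ≤ p.length + 1 := by
      rw [hlen11]
    obtain ⟨heq2, hI2, hlen21, hlen22, hpres2, hrange2, hroot2⟩ :=
      find_all (p := (findB (p.length + 1) (p, q) u).1.1)
        (q := (findB (p.length + 1) (p, q) u).1.2) hI1 hv' hf2
    -- names for the two find results
    set R1 := findB (p.length + 1) (p, q) u with hR1
    set R2 := findB (p.length + 1) R1.1 v with hR2
    have heq2' : findA (p.length + 1) R1.1 v = R2 := heq2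
    have hI2' : StInv R2.1 := hI2
    have hlen21' : R2.1.1.length = p.length := by rw [hlen21, hlen11]
    have hlen22' : R2.1.2.length = q.length := by rw [hlen22, hlen12]
    have hra : pvGet R2.1.1 R1.2.1 = R1.2.1 := by
      apply hpres2
      · rw [hlen11, hpL]
        constructor
        · have := hrange1.1; omega
        · rw [← hpL]; exact hrange1.2
      · exact hroot1
    have hrb : pvGet R2.1.1 R2.2.1 = R2.2.1 := hroot2
    have hraR : 0 ≤ R1.2.1 ∧ R1.2.1 < (R2.1.1.length : Int) := by
      rw [hlen21']; exact hrange1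
    have hrbR : 0 ≤ R2.2.1 ∧ R2.2.1 < (R2.1.1.length : Int) := by
      rw [hlen21, hlen11]
      rw [hlen11] at hrange2
      exact hrange2
    have hunion : unionA (p.length + 1) (p, q) u v w =
        (if R1.2.1 ≠ R2.2.1 then
            ((pvSet R2.1.1 R2.2.1 R1.2.1, pvSet R2.1.2 R2.2.1
                (PySem.Int.bxor (PySem.Int.bxor R1.2.2 R2.2.2) w)),
              (1 : Int))
          else if PySem.Int.bxor (PySem.Int.bxor R1.2.2 R2.2.2) w ≠ 0 then (R2.1, 0)
          else (R2.1, 1)) := by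
      simp only [unionA]
      rw [heq1, heq2']
    have hPre' : ∀ e ∈ rest, ∃ u v w : Int, e = [u, v, w] ∧ InR L u ∧ InR L v :=
      fun e he => hPre e (List.mem_cons_of_mem _ he)
    simp only [List.foldl_cons]
    rw [← hR1, ← hR2]
    by_cases hne : R1.2.1 = R2.2.1
    · -- same root: no state change, both continue on R2.1
      have hcond : ¬ (R1.2.1 ≠ R2.2.1) := by simp [hne]
      by_cases hx : PySem.Int.bxor (PySem.Int.bxor R1.2.2 R2.2.2) w = 0
      · have hA : ((unionA (p.length + 1) (p, q) u v w).1,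
            ans + (unionA (p.length + 1) (p, q) u v w).2) = (R2.1, ans + 1) := by
          rw [hunion, if_neg hcond,
            if_neg (show ¬ (PySem.Int.bxor (PySem.Int.bxor R1.2.2 R2.2.2) w ≠ 0) by simp [hx])]
        rw [hA, if_neg hcond, if_pos hx]
        exact ih R2.1 (ans + 1) hI2' (by rw [hlen21', hpL]) hPre'
      · have hA : ((unionA (p.length + 1) (p, q) u v w).1,
            ans + (unionA (p.length + 1) (p, q) u v w).2) = (R2.1, ans + 0) := by
          rw [hunion, if_neg hcond, if_pos hx]
        rw [hA, if_neg hcond, if_neg hx, add_zero]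
        exact ih R2.1 ans hI2' (by rw [hlen21', hpL]) hPre'
    · -- different roots: rb is hung under ra, the invariant is re-established
      have hcond : R1.2.1 ≠ R2.2.1 := hne
      have hInR_rb : InR R2.1.1.length R2.2.1 := ⟨by have := hrbR.1; omega, hrbR.2⟩
      have hInR_ra : InR R2.1.1.length R1.2.1 := ⟨by have := hraR.1; omega, hraR.2⟩
      have hcellne : cellOf R2.1.1.length R2.2.1 ≠ cellOf R2.1.1.length R1.2.1 := by
        unfold cellOf
        rw [if_pos hrbR.1, if_pos hraR.1]
        intro hcc
        apply hne
        have h1 := hraR.1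
        have h2 := hrbR.1
        omega
      have hA : ((unionA (p.length + 1) (p, q) u v w).1,
          ans + (unionA (p.length + 1) (p, q) u v w).2) =
          ((pvSet R2.1.1 R2.2.1 R1.2.1, pvSet R2.1.2 R2.2.1
              (PySem.Int.bxor (PySem.Int.bxor R1.2.2 R2.2.2) w)), ans + 1) := by
        rw [hunion, if_pos hcond]
      rw [hA, if_pos hcond]
      set P' := pvSet R2.1.1 R2.2.1 R1.2.1 with hP'
      set Q' := pvSet R2.1.2 R2.2.1 (PySem.Int.bxor (PySem.Int.bxor R1.2.2 R2.2.2) w) with hQ'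
      have hP'len : P'.length = R2.1.1.length := length_pvSet _ _ _
      have hQ'len : Q'.length = R2.1.2.length := length_pvSet _ _ _
      obtain ⟨hlq2, hE2, hT2⟩ := hI2'
      have hdesc' : ∀ x, InR R2.1.1.length x →
          pvGet P' x = pvGet R2.1.1 x ∨ pvGet P' x = R1.2.1 := by
        intro x hx
        rw [hP', pvGet_pvSet R2.1.1 R2.2.1 x R1.2.1 hInR_rb hx]
        split
        · exact Or.inr rfl
        · exact Or.inl rfl
      have hrv : pvGet P' R1.2.1 = R1.2.1 := by
        rw [hP', pvGet_pvSet R2.1.1 R2.2.1 R1.2.1 R1.2.1 hInR_rb hInR_ra, if_neg hcellne]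
        exact hra
      have hE' : entriesOk P' := by
        intro c hcL
        rw [hP'len] at hcL
        have hcInR : InR R2.1.1.length (c : Int) := by constructor <;> omega
        rw [hP'len]
        rcases hdesc' _ hcInR with h | h
        · rw [h]; exact hE2 c hcL
        · rw [h]; exact hraR
      have hT' : totalP P' := by
        intro c hcL
        rw [hP'len] at hcL
        obtain ⟨l0, r0, hc0⟩ := hT2 c hcL
        have hcInR : InR R2.1.1.length (c : Int) := by constructor <;> omega
        exact total_update hE2 hrv hdesc' hc0 hcInR
      have hI' : StInv (P', Q') := by
        refine ⟨?_, hE', hT'⟩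
        simp only
        rw [hQ'len, hP'len, hlq2]
      exact ih (P', Q') (ans + 1) hI' (by rw [hP'len, hlen21', hpL]) hPre'

-- the two initial parity lists are the same list
lemma parity_init_eq (n : Int) :
    (PySem.List.pyRange 0 n 1).map (fun _ => (0 : Int)) =
      List.replicate (PySem.List.pyRange 0 n 1).length (0 : Int) := by
  simp [List.map_const']

lemma init_get (n : Int) (c : Nat) (hc : c < (PySem.List.pyRange 0 n 1).length) :
    pvGet (PySem.List.pyRange 0 n 1) (c : Int) = (c : Int) := by
  unfold pvGet
  rw [PySem.List.pyGetD_natCast, List.getD_eq_getElem _ _ hc, PySem.List.getElem_pyRange_one]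
  simp

lemma init_StInv (n : Int) :
    StInv (PySem.List.pyRange 0 n 1,
      List.replicate (PySem.List.pyRange 0 n 1).length (0 : Int)) := by
  refine ⟨by simp, ?_, ?_⟩
  · intro c hc
    rw [init_get n c hc]
    constructor
    · positivity
    · exact_mod_cast hc
  · intro c hc
    exact ⟨[], (c : Int), Chain.stop _ (init_get n c hc)⟩

-- ===== VERDICT (by name: the statement is the Claim_ definition above) =====
theorem numberOfEdgesAdded_spec : Claim_equal_numberOfEdgesAdded := by
  intro n edges hDom hPre
  unfold Spec_numberOfEdgesAdded
  have hPreE : ∀ e ∈ edges, ∃ u v w : Int, e = [u, v, w] ∧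
      InR (PySem.List.pyRange 0 n 1).length u ∧ InR (PySem.List.pyRange 0 n 1).length v := by
    intro e he
    obtain ⟨h3, hu, hv⟩ := hPre e he
    obtain ⟨u, v, w, rfl⟩ := List.length_eq_three.mp h3
    simp only [List.getD] at hu hv
    have hL : (PySem.List.pyRange 0 n 1).length = (n - 0).toNat := by
      rw [PySem.List.length_pyRange_one]
    refine ⟨u, v, w, rfl, ?_, ?_⟩
    · rw [hL]
      simp only [List.getElem?_cons_zero, Option.getD_some] at hu
      constructor <;> omega
    · rw [hL]
      simp only [List.getElem?_cons_succ, List.getElem?_cons_zero, Option.getD_some] at hv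
      constructor <;> omega
  have h := fold_eq (PySem.List.pyRange 0 n 1).length edges
    (PySem.List.pyRange 0 n 1, List.replicate (PySem.List.pyRange 0 n 1).length (0 : Int)) 0
    (init_StInv n) rfl hPreE
  simp only [numberOfEdgesAdded, numberOfEdgesAdded_alt, parity_init_eq]
  exact congrArg Prod.snd h
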